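-- pv_equiv track=rewrite | github.com/gbsouzadev/portfolioFlask | helpers.py | mergeDigits1122
-- ===== SOURCE A (Python) =====
-- def mergeDigits1122(number):
--
--     numberSum = 0
--     strNumber = str(number)
--
--     if len(strNumber) == 1 or number == 11 or number == 22:
--         return number
--
--     for digit in strNumber:
--         numberSum = numberSum + int(digit)
--     return mergeDigits1122(numberSum)
-- ===== SOURCE B (Python) =====
-- def mergeDigits1122(number):
--     while number > 9 and number != 11 and number != 22:
--         s = 0
--         n = number
--         while n > 0:
--             s += n % 10
--             n //= 10
--         number = s
--     return number
-- ===== Notes on version B (the rewrite author's own statement) =====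
-- stated objective: alternative
-- what changed: Replaces string-conversion recursion (str(number), summing int(d) per character, recursive call) with an explicit while-loop that extracts digits arithmetically via % 10 and // 10, no string conversion at all.
import Mathlib
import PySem

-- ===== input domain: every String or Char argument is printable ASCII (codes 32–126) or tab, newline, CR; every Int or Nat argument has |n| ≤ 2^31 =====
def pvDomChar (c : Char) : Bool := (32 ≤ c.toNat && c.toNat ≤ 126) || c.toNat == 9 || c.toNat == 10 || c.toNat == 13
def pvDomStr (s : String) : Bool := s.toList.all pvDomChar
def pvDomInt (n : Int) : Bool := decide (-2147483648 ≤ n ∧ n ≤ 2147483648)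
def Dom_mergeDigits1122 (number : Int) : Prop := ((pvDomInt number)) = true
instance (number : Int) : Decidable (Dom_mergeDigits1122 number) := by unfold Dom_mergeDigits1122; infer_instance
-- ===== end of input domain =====

-- B replaces A's string-conversion recursion by an explicit while-loop extracting digits
-- arithmetically with % 10 and // 10 (objective: alternative; return-value equivalence on
-- nonnegative inputs; A raises ValueError on negatives, which Pre_ excludes).

-- ===== PORT A =====
-- faithful port of A: str(number) via PySem.Int.toChars, int(digit) via PySem.Int.ofChars?
-- (.getD 0 stands on the `none` branch, where Python raises ValueError — excluded by Pre_).
-- The fuel argument only makes the same recursion total: 2 * |number| + 2 is proved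
-- sufficient below (each recursive call strictly shrinks the measure 2*|n| + sign bit).
def mergeDigits1122Go (fuel : Nat) (number : Int) : Int :=
  match fuel with
  | 0 => number
  | fuel + 1 =>
    let strNumber := PySem.Int.toChars number
    if strNumber.length = 1 ∨ number = 11 ∨ number = 22 then number
    else mergeDigits1122Go fuel
      (strNumber.foldl (fun numberSum digit => numberSum + (PySem.Int.ofChars? [digit]).getD 0) 0)

def mergeDigits1122 (number : Int) : Int := mergeDigits1122Go (2 * number.natAbs + 2) number

-- ===== PORT B =====
-- B's inner `while n > 0` loop: s accumulates n % 10, n becomes n // 10.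
-- Fuel only makes the loop total: n.toNat iterations are proved sufficient below.
def pvDigitLoop (fuel : Nat) (n s : Int) : Int :=
  match fuel with
  | 0 => s
  | fuel + 1 =>
    if 0 < n then pvDigitLoop fuel (PySem.Int.floordiv n 10) (s + PySem.Int.mod n 10) else s

-- B's outer `while number > 9 and number != 11 and number != 22` loop (fuel as above)
def pvOuterLoop (fuel : Nat) (number : Int) : Int :=
  match fuel with
  | 0 => number
  | fuel + 1 =>
    if 9 < number ∧ number ≠ 11 ∧ number ≠ 22 then
      pvOuterLoop fuel (pvDigitLoop number.toNat number 0)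
    else number

def mergeDigits1122_alt (number : Int) : Int := pvOuterLoop (number.toNat + 1) number

-- ===== PRECONDITION & SPEC =====
-- Pre_ excludes exactly the negative inputs, on which A raises ValueError (int('-')).
def Pre_mergeDigits1122 (number : Int) : Prop := 0 ≤ number
instance (number : Int) : Decidable (Pre_mergeDigits1122 number) := by
  unfold Pre_mergeDigits1122; infer_instance

def pvWitness_mergeDigits1122 : Int := 38

def Spec_mergeDigits1122 (number : Int) (out : Int) : Prop := out = mergeDigits1122_alt number
instance (number : Int) (out : Int) : Decidable (Spec_mergeDigits1122 number out) := by
  unfold Spec_mergeDigits1122; infer_instance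

-- ===== CLAIM (what is proved, stated in full; the proofs are below) =====
def Claim_equal_mergeDigits1122 : Prop := ∀ (number : Int), Dom_mergeDigits1122 number →
  Pre_mergeDigits1122 number → Spec_mergeDigits1122 number (mergeDigits1122 number)

-- ===== LEMMAS AND PROOFS =====

-- arithmetic digit sum of a natural number (proof-side reference function)
def pvDsum (m : Nat) : Nat :=
  if m < 10 then m else pvDsum (m / 10) + m % 10
termination_by m
decreasing_by omega

-- structural form of Nat.toDigits 10 (proof-side reference function)
def pvRep (n : Nat) : List Char :=
  if n < 10 then [Nat.digitChar n] else pvRep (n / 10) ++ [Nat.digitChar (n % 10)]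
termination_by n
decreasing_by omega

lemma pvDsum_le (m : Nat) : pvDsum m ≤ m := by
  induction m using pvDsum.induct with
  | case1 m h => rw [pvDsum, if_pos h]
  | case2 m h ih => rw [pvDsum, if_neg h]; omega

lemma pvDsum_lt (m : Nat) (h : 10 ≤ m) : pvDsum m < m := by
  rw [pvDsum, if_neg (by omega)]
  have := pvDsum_le (m / 10)
  omega

lemma pvToDigitsCore_eq (f : Nat) : ∀ (n : Nat) (acc : List Char), n < f →
    Nat.toDigitsCore 10 f n acc = pvRep n ++ acc := by
  induction f with
  | zero => intro n acc h; omega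
  | succ f ih =>
    intro n acc h
    rw [Nat.toDigitsCore]
    by_cases h10 : n / 10 = 0
    · rw [if_pos h10, pvRep, if_pos (by omega), Nat.mod_eq_of_lt (by omega)]
      simp
    · rw [if_neg h10, ih (n / 10) _ (by omega)]
      have hge : ¬ n < 10 := by omega
      conv_rhs => rw [pvRep, if_neg hge]
      simp

lemma pvToDigits_eq (n : Nat) : Nat.toDigits 10 n = pvRep n := by
  have h := pvToDigitsCore_eq (n + 1) n [] (by omega)
  simpa [Nat.toDigits] using h

lemma pvRep_length_pos (n : Nat) : 0 < (pvRep n).length := by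
  rw [pvRep]; split <;> simp

lemma pvRep_length_one (n : Nat) : (pvRep n).length = 1 ↔ n < 10 := by
  constructor
  · intro h
    by_contra hn
    rw [pvRep, if_neg hn, List.length_append] at h
    have := pvRep_length_pos (n / 10)
    simp only [List.length_cons, List.length_nil] at h
    omega
  · intro h; rw [pvRep, if_pos h]; rfl

lemma pvDigitVal (d : Nat) (h : d < 10) :
    (PySem.Int.ofChars? [Nat.digitChar d]).getD 0 = (d : Int) := by
  interval_cases d <;> decide

lemma pvFoldRep (m : Nat) : ∀ s : Int,
    (pvRep m).foldl (fun numberSum digit => numberSum + (PySem.Int.ofChars? [digit]).getD 0) s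
      = s + (pvDsum m : Int) := by
  induction m using pvRep.induct with
  | case1 m h =>
    intro s
    rw [pvRep, if_pos h, pvDsum, if_pos h]
    simp [pvDigitVal m h]
  | case2 m h ih =>
    intro s
    rw [pvRep, if_neg h, pvDsum, if_neg h, List.foldl_append, ih]
    simp [pvDigitVal (m % 10) (by omega)]
    ring

-- the digit-character sum A computes equals the arithmetic digit sum of |n|
lemma pvA_sum (n : Int) :
    (PySem.Int.toChars n).foldl
        (fun numberSum digit => numberSum + (PySem.Int.ofChars? [digit]).getD 0) 0
      = (pvDsum n.natAbs : Int) := by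
  by_cases h : n < 0
  · simp only [PySem.Int.toChars, if_pos h, pvToDigits_eq]
    have hminus : (PySem.Int.ofChars? ['-']).getD 0 = 0 := by decide
    simp [List.foldl_cons, hminus, pvFoldRep]
  · simp only [PySem.Int.toChars, if_neg h, pvToDigits_eq]
    rw [pvFoldRep]
    have : n.toNat = n.natAbs := by omega
    rw [this]; ring

lemma pvA_len_one (n : Int) : (PySem.Int.toChars n).length = 1 ↔ 0 ≤ n ∧ n < 10 := by
  by_cases h : n < 0
  · simp only [PySem.Int.toChars, if_pos h, List.length_cons, pvToDigits_eq]
    have := pvRep_length_pos n.natAbs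
    constructor
    · intro hc; omega
    · intro hc; omega
  · simp only [PySem.Int.toChars, if_neg h, pvToDigits_eq, pvRep_length_one]
    omega

-- the fuelled inner loop computes the arithmetic digit sum (fuel n.toNat suffices)
lemma pvDigitLoop_eq (fuel : Nat) : ∀ (n : Int), 0 ≤ n → n.toNat ≤ fuel → ∀ s : Int,
    pvDigitLoop fuel n s = s + (pvDsum n.toNat : Int) := by
  induction fuel with
  | zero =>
    intro n hn hf s
    have : n = 0 := by omega
    subst this
    rw [pvDigitLoop, pvDsum, if_pos (by omega)]
    simp
  | succ fuel ih =>
    intro n hn hf s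
    rw [pvDigitLoop]
    by_cases h0 : 0 < n
    · rw [if_pos h0,
        PySem.Int.floordiv_eq_ediv_of_pos (by omega), PySem.Int.mod_eq_emod_of_pos (by omega)]
      rw [ih (n / 10) (by omega) (by omega)]
      have hdiv : (n / 10).toNat = n.toNat / 10 := by omega
      have hmod : n % 10 = ((n.toNat % 10 : Nat) : Int) := by omega
      rw [hdiv, hmod]
      conv_rhs => rw [pvDsum]
      by_cases h10 : n.toNat < 10
      · have hz : pvDsum 0 = 0 := by rw [pvDsum]; simp
        rw [if_pos h10, Nat.div_eq_of_lt h10, hz]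
        have : n.toNat % 10 = n.toNat := Nat.mod_eq_of_lt h10
        rw [this]; push_cast; ring
      · rw [if_neg h10]
        push_cast; ring
    · rw [if_neg h0]
      have : n = 0 := by omega
      subst this
      rw [pvDsum, if_pos (by omega)]
      simp

-- with sufficient fuel on both sides, the two recursions agree on nonnegative inputs
lemma pvMain (k : Nat) : ∀ (n : Int) (fa fb : Nat), 0 ≤ n → n.toNat ≤ k →
    n.toNat < fa → n.toNat < fb → mergeDigits1122Go fa n = pvOuterLoop fb n := by
  induction k with
  | zero =>
    intro n fa fb hn hk hfa hfb
    have hn0 : n = 0 := by omega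
    subst hn0
    cases fa with
    | zero => omega
    | succ fa =>
      cases fb with
      | zero => omega
      | succ fb =>
        rw [mergeDigits1122Go, pvOuterLoop]
        rw [if_pos (by left; rw [pvA_len_one]; omega), if_neg (by omega)]
  | succ k ih =>
    intro n fa fb hn hk hfa hfb
    cases fa with
    | zero => omega
    | succ fa =>
      cases fb with
      | zero => omega
      | succ fb =>
        rw [mergeDigits1122Go, pvOuterLoop]
        by_cases hsmall : n < 10
        · rw [if_pos (by left; rw [pvA_len_one]; exact ⟨hn, hsmall⟩), if_neg (by omega)]
        · by_cases h1122 : n = 11 ∨ n = 22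
          · rw [if_pos (by tauto), if_neg (by tauto)]
          · rw [not_or] at h1122
            rw [if_neg (by rw [not_or, not_or, pvA_len_one]; exact ⟨by omega, h1122⟩),
              if_pos ⟨by omega, h1122⟩]
            rw [pvA_sum, pvDigitLoop_eq n.toNat n hn (le_refl _) 0, zero_add]
            have habs : n.natAbs = n.toNat := by omega
            rw [habs]
            have hlt := pvDsum_lt n.toNat (by omega)
            have hcast : ((pvDsum n.toNat : Nat) : Int).toNat = pvDsum n.toNat := by omega
            exact ih _ fa fb (by positivity) (by omega) (by omega) (by omega)

-- ===== VERDICT (by name: the statement is the Claim_ definition above) =====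
theorem mergeDigits1122_spec : Claim_equal_mergeDigits1122 := by
  intro n _ hpre
  unfold Spec_mergeDigits1122 mergeDigits1122 mergeDigits1122_alt
  exact pvMain n.toNat n _ _ hpre (le_refl _) (by omega) (by omega)
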